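-- pv_equiv track=rewrite | github.com/bensonchow123/malvern-maps | shortest_path_calculations.py | handle_select_fields
-- ===== SOURCE A (Python) =====
-- def handle_select_fields(nodes, remove_stairs, allow_shortcuts, only_walkways, only_car_paths):
--     for node in nodes.values():
--         node['connected_nodes'] = [connected_node for connected_node in node['connected_nodes'] if not (
--             (remove_stairs == 'yes' and connected_node['vertex_type'] == 'stairs') or
--             (allow_shortcuts == 'no' and connected_node['vertex_type'] == 'shortcut') or
--             (only_walkways == 'yes' and connected_node['vertex_type'] == 'car_path') or
--             (only_car_paths == 'yes' and connected_node['vertex_type'] == 'walkway')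
--         )]
--     return nodes
-- ===== SOURCE B (Python) =====
-- def handle_select_fields(nodes, remove_stairs, allow_shortcuts, only_walkways, only_car_paths):
--     # staged passes: one sweep per active flag, each erasing a single vertex type
--     passes = []
--     if remove_stairs == 'yes':
--         passes.append('stairs')
--     if allow_shortcuts == 'no':
--         passes.append('shortcut')
--     if only_walkways == 'yes':
--         passes.append('car_path')
--     if only_car_paths == 'yes':
--         passes.append('walkway')
--     for vertex_type in passes:
--         for node in nodes.values():
--             node['connected_nodes'] = [cn for cn in node['connected_nodes']
--                                        if cn['vertex_type'] != vertex_type]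
--     return nodes
-- ===== Notes on version B (the rewrite author's own statement) =====
-- stated objective: alternative
-- what changed: B replaces A's single pass that re-tests all four flag conditions on every edge with staged removal passes: it first interprets the flags into a list of vertex types to erase, then makes one full sweep over the graph per active flag, each sweep deleting exactly one vertex type; correct because the four removals target disjoint vertex types, so successive independent removals compose to A's combined filter.
import Mathlib
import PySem

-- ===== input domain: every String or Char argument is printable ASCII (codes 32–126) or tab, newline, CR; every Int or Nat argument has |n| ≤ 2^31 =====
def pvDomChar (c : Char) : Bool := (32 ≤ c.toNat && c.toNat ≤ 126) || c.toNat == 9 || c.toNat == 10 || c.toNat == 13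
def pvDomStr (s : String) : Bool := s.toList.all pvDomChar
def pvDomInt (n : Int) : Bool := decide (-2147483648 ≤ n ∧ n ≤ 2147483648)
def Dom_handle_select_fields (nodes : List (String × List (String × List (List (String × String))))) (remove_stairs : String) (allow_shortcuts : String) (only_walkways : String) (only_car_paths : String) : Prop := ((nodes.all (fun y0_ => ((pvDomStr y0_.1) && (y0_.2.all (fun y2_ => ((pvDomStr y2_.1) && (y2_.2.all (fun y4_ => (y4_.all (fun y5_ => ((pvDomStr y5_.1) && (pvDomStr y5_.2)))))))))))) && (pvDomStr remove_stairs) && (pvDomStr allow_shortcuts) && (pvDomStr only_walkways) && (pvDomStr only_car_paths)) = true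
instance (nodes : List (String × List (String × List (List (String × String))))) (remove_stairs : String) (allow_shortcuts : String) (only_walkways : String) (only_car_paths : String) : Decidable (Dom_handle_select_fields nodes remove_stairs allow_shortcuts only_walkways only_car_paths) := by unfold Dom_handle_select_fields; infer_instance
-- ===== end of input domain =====

-- B = staged removal passes (one sweep per active flag) instead of A's single
-- four-condition filter; same return value (A and B both mutate the dict in Python;
-- the equivalence proved here is about the returned value).

-- ===== PORT A =====
-- shared dict primitives for both ports: first-match lookup and in-place overwrite
-- of an existing key (Python dict read / item assignment; present under Pre_)
def hsfGetCN (node : List (String × List (List (String × String)))) : List (List (String × String)) :=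
  (List.lookup "connected_nodes" node).getD []

def hsfVT (cn : List (String × String)) : String :=
  (List.lookup "vertex_type" cn).getD ""

def hsfSetCN : List (String × List (List (String × String))) → List (List (String × String)) → List (String × List (List (String × String)))
  | [], _ => []
  | (k, v) :: rest, nv => if k == "connected_nodes" then (k, nv) :: rest else (k, v) :: hsfSetCN rest nv

-- A: one pass over the nodes, testing all four flag/vertex-type pairs per edge
def handle_select_fields (nodes : List (String × List (String × List (List (String × String))))) (remove_stairs : String) (allow_shortcuts : String) (only_walkways : String) (only_car_paths : String) : List (String × List (String × List (List (String × String)))) :=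
  nodes.map (fun p =>
    (p.1, hsfSetCN p.2 ((hsfGetCN p.2).filter (fun cn =>
      !((remove_stairs == "yes" && hsfVT cn == "stairs") ||
        (allow_shortcuts == "no" && hsfVT cn == "shortcut") ||
        (only_walkways == "yes" && hsfVT cn == "car_path") ||
        (only_car_paths == "yes" && hsfVT cn == "walkway"))))))

-- ===== PORT B =====
-- B: interpret the flags into the list of vertex types to erase, then run one
-- full sweep over the graph per entry, each sweep deleting a single vertex type
def hsfPasses (remove_stairs allow_shortcuts only_walkways only_car_paths : String) : List String :=
  (if remove_stairs == "yes" then ["stairs"] else []) ++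
  (if allow_shortcuts == "no" then ["shortcut"] else []) ++
  (if only_walkways == "yes" then ["car_path"] else []) ++
  (if only_car_paths == "yes" then ["walkway"] else [])

def handle_select_fields_alt (nodes : List (String × List (String × List (List (String × String))))) (remove_stairs : String) (allow_shortcuts : String) (only_walkways : String) (only_car_paths : String) : List (String × List (String × List (List (String × String)))) :=
  (hsfPasses remove_stairs allow_shortcuts only_walkways only_car_paths).foldl
    (fun acc vt => acc.map (fun p =>
      (p.1, hsfSetCN p.2 ((hsfGetCN p.2).filter (fun cn => !(hsfVT cn == vt))))))
    nodes

-- ===== PRECONDITION & SPEC =====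
-- Pre_ excludes exactly the KeyError inputs of A: every node must own a
-- 'connected_nodes' key, and when some flag is active (so A reads
-- cn['vertex_type']) every connected node must own a 'vertex_type' key.
def Pre_handle_select_fields (nodes : List (String × List (String × List (List (String × String))))) (remove_stairs : String) (allow_shortcuts : String) (only_walkways : String) (only_car_paths : String) : Prop :=
  (∀ p ∈ nodes, (List.lookup "connected_nodes" p.2).isSome = true) ∧
  ((remove_stairs = "yes" ∨ allow_shortcuts = "no" ∨ only_walkways = "yes" ∨ only_car_paths = "yes") →
    ∀ p ∈ nodes, ∀ cn ∈ (List.lookup "connected_nodes" p.2).getD [], (List.lookup "vertex_type" cn).isSome = true)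
instance (nodes : List (String × List (String × List (List (String × String))))) (remove_stairs : String) (allow_shortcuts : String) (only_walkways : String) (only_car_paths : String) : Decidable (Pre_handle_select_fields nodes remove_stairs allow_shortcuts only_walkways only_car_paths) := by unfold Pre_handle_select_fields; infer_instance

def pvWitness_handle_select_fields : (List (String × List (String × List (List (String × String))))) × String × String × String × String :=
  ([("a", [("connected_nodes", [[("vertex_type", "stairs")], [("vertex_type", "walkway")]])])], "yes", "yes", "no", "no")

def Spec_handle_select_fields (nodes : List (String × List (String × List (List (String × String))))) (remove_stairs : String) (allow_shortcuts : String) (only_walkways : String) (only_car_paths : String) (out : List (String × List (String × List (List (String × String))))) : Prop := out = handle_select_fields_alt nodes remove_stairs allow_shortcuts only_walkways only_car_paths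
instance (nodes : List (String × List (String × List (List (String × String))))) (remove_stairs : String) (allow_shortcuts : String) (only_walkways : String) (only_car_paths : String) (out : List (String × List (String × List (List (String × String))))) : Decidable (Spec_handle_select_fields nodes remove_stairs allow_shortcuts only_walkways only_car_paths out) := by
  unfold Spec_handle_select_fields
  haveI d1 : DecidableEq (List (List (String × String))) := inferInstance
  haveI d2 : DecidableEq (List (String × List (List (String × String)))) := inferInstance
  haveI d3 : DecidableEq (List (String × List (String × List (List (String × String))))) := inferInstance
  infer_instance

-- ===== CLAIM (what is proved, stated in full; the proofs are below) =====
def Claim_equal_handle_select_fields : Prop := ∀ (nodes : List (String × List (String × List (List (String × String))))) (remove_stairs : String) (allow_shortcuts : String) (only_walkways : String) (only_car_paths : String), Dom_handle_select_fields nodes remove_stairs allow_shortcuts only_walkways only_car_paths → Pre_handle_select_fields nodes remove_stairs allow_shortcuts only_walkways only_car_paths → Spec_handle_select_fields nodes remove_stairs allow_shortcuts only_walkways only_car_paths (handle_select_fields nodes remove_stairs allow_shortcuts only_walkways only_car_paths)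

-- ===== LEMMAS AND PROOFS =====
lemma hsf_lookup_setCN (n : List (String × List (List (String × String)))) (v : List (List (String × String)))
    (h : (List.lookup "connected_nodes" n).isSome = true) :
    List.lookup "connected_nodes" (hsfSetCN n v) = some v := by
  induction n with
  | nil => simp at h
  | cons p rest ih =>
    obtain ⟨k, w⟩ := p
    by_cases hk : k = "connected_nodes"
    · simp [hsfSetCN, hk]
    · have hk' : ("connected_nodes" == k) = false := by
        simp; exact fun hh => hk hh.symm
      have hrest : (List.lookup "connected_nodes" rest).isSome = true := by
        simpa [List.lookup, hk'] using h
      simp [hsfSetCN, hk, List.lookup, hk', ih hrest]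

lemma hsf_setCN_setCN (n : List (String × List (List (String × String)))) (v v' : List (List (String × String))) :
    hsfSetCN (hsfSetCN n v) v' = hsfSetCN n v' := by
  induction n with
  | nil => simp [hsfSetCN]
  | cons p rest ih =>
    obtain ⟨k, w⟩ := p
    by_cases hk : k = "connected_nodes" <;> simp [hsfSetCN, hk, ih]

lemma hsf_setCN_self (n : List (String × List (List (String × String))))
    (h : (List.lookup "connected_nodes" n).isSome = true) :
    hsfSetCN n (hsfGetCN n) = n := by
  induction n with
  | nil => simp at h
  | cons p rest ih =>
    obtain ⟨k, v⟩ := p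
    by_cases hk : k = "connected_nodes"
    · simp [hsfSetCN, hsfGetCN, List.lookup, hk]
    · have hk' : ("connected_nodes" == k) = false := by
        simp; exact fun hh => hk hh.symm
      have hrest : (List.lookup "connected_nodes" rest).isSome = true := by
        simpa [List.lookup, hk'] using h
      have : hsfGetCN ((k, v) :: rest) = hsfGetCN rest := by
        simp [hsfGetCN, List.lookup, hk']
      simp [hsfSetCN, hk, this, ih hrest]

-- B's per-type sweeps, folded over one node record, equal one combined filter
lemma hsf_foldPair (ts : List String) (p : String × List (String × List (List (String × String))))
    (h : (List.lookup "connected_nodes" p.2).isSome = true) :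
    ts.foldl (fun q vt => (q.1, hsfSetCN q.2 ((hsfGetCN q.2).filter (fun cn => !(hsfVT cn == vt))))) p
      = (p.1, hsfSetCN p.2 ((hsfGetCN p.2).filter (fun cn => !(ts.contains (hsfVT cn))))) := by
  induction ts generalizing p with
  | nil =>
    simp only [List.foldl_nil, List.contains_nil, Bool.not_false, List.filter_true]
    rw [hsf_setCN_self p.2 h]
  | cons t ts ih =>
    rw [List.foldl_cons]
    set n' := hsfSetCN p.2 ((hsfGetCN p.2).filter (fun cn => !(hsfVT cn == t))) with hn'
    have hlook : List.lookup "connected_nodes" n' = some ((hsfGetCN p.2).filter (fun cn => !(hsfVT cn == t))) :=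
      hsf_lookup_setCN _ _ h
    have hsome : (List.lookup "connected_nodes" n').isSome = true := by rw [hlook]; rfl
    rw [ih (p.1, n') hsome]
    have hget : hsfGetCN n' = (hsfGetCN p.2).filter (fun cn => !(hsfVT cn == t)) := by
      simp [hsfGetCN, hlook]
    rw [hget, hn', hsf_setCN_setCN, List.filter_filter]
    congr 2
    apply List.filter_congr
    intro cn _
    cases hb : (hsfVT cn == t) <;> cases hc : ts.contains (hsfVT cn) <;>
      simp_all

-- folding B's whole-graph sweeps = mapping the per-node fold
lemma hsf_fold_map (ts : List String) (nodes : List (String × List (String × List (List (String × String))))) :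
    ts.foldl (fun acc vt => acc.map (fun p =>
        (p.1, hsfSetCN p.2 ((hsfGetCN p.2).filter (fun cn => !(hsfVT cn == vt)))))) nodes
      = nodes.map (fun p => ts.foldl (fun q vt =>
          (q.1, hsfSetCN q.2 ((hsfGetCN q.2).filter (fun cn => !(hsfVT cn == vt))))) p) := by
  induction ts generalizing nodes with
  | nil => simp
  | cons t ts ih => rw [List.foldl_cons, ih, List.map_map]; rfl

lemma hsf_beq_decide (a b : String) : (a == b) = decide (a = b) := by
  by_cases h : a = b <;> simp [h]

-- A's four-way condition = membership in B's pass list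
lemma hsf_cond (rs asc ow oc vt : String) :
    ((rs == "yes" && vt == "stairs") ||
     (asc == "no" && vt == "shortcut") ||
     (ow == "yes" && vt == "car_path") ||
     (oc == "yes" && vt == "walkway")) =
    (hsfPasses rs asc ow oc).contains vt := by
  unfold hsfPasses
  cases h1 : (rs == "yes") <;> cases h2 : (asc == "no") <;>
    cases h3 : (ow == "yes") <;> cases h4 : (oc == "yes") <;>
    simp [h1, h2, h3, h4, List.contains_cons, Bool.or_assoc, hsf_beq_decide]

-- ===== VERDICT (by name: the statement is the Claim_ definition above) =====
theorem handle_select_fields_spec : Claim_equal_handle_select_fields := by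
  intro nodes rs asc ow oc _ hpre
  unfold Spec_handle_select_fields handle_select_fields handle_select_fields_alt
  rw [hsf_fold_map]
  apply List.map_congr_left
  intro p hp
  rw [hsf_foldPair _ p (hpre.1 p hp)]
  congr 2
  apply List.filter_congr
  intro cn _
  rw [hsf_cond]
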